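-- pv_equiv track=rewrite | github.com/andy1li/adventofcode | 2020/day20_jigsaw.py | peel
-- ===== SOURCE A (Python) =====
-- from collections import defaultdict
--
-- key = lambda b: min([b, b[::-1]])
--
-- def peel(tiles):
--     agg = defaultdict(set)
--     for tile in tiles:
--         for border in tile:
--             agg[key(border)].add(tile)
--
--     outer_borders, inner_borders = set(), set()
--     for border, ts in agg.items():
--         if len(ts) == 1: outer_borders.add(key(border))
--         elif len(ts) == 2: inner_borders.add(key(border))
--         else: raise ValueError
--     outer_tiles = {t for t in tiles if any(key(b) in outer_borders for b in t)}
--     inner_tiles = {t for t in tiles if all(key(b) in inner_borders for b in t)}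
--     return outer_tiles, agg, inner_tiles
-- ===== SOURCE B (Python) =====
-- # Alternative decomposition: one pass over agg unions size-1 border owners into outer_tiles
-- # (validating counts in the same pass); inner_tiles is the set complement of outer_tiles.
-- from collections import defaultdict
--
-- key = lambda b: min([b, b[::-1]])
--
-- def peel(tiles):
--     agg = defaultdict(set)
--     for tile in tiles:
--         for border in tile:
--             agg[key(border)].add(tile)
--
--     outer_tiles = set()
--     for ts in agg.values():
--         if len(ts) == 1:
--             outer_tiles |= ts
--         elif len(ts) != 2:
--             raise ValueError
--     inner_tiles = set(tiles) - outer_tiles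
--     return outer_tiles, agg, inner_tiles
-- ===== Notes on version B (the rewrite author's own statement) =====
-- stated objective: alternative
-- what changed: B drops A's outer_borders/inner_borders classification sets and A's two per-tile membership scans of tiles: it makes one pass over agg's values, unioning each size-1 tile-set directly into outer_tiles (raising ValueError in the same pass when a count is neither 1 nor 2), and obtains inner_tiles as set(tiles) - outer_tiles, relying on the validated counts.
import Mathlib
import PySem

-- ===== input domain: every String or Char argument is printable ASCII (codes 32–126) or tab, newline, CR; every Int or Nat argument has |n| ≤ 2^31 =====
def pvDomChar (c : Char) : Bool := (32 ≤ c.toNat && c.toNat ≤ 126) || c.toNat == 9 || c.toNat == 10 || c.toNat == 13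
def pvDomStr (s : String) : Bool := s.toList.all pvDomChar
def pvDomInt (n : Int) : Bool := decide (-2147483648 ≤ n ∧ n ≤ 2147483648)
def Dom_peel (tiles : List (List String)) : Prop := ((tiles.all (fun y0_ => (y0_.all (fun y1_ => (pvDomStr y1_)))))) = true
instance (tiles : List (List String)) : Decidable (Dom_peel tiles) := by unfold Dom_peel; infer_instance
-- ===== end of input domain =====

-- B replaces A's border-classification sets and its two scans of `tiles` by one pass over agg
-- (unioning the size-1 tile-sets into outer_tiles) and a set complement for inner_tiles (alternative decomposition).

-- ===== PORT A =====
-- shared helper: key = lambda b: min([b, b[::-1]])  (b[::-1] = PySem slice with step -1, never raises)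
def pyRev (s : String) : String := (PySem.Str.slice? s none none (-1)).getD ""
-- min([b, b[::-1]]) of the two-element list, hand-ported exactly: the first (left) extremal wins
def pkey (b : String) : String := if PySem.Chars.strLt (pyRev b).toList b.toList then pyRev b else b
-- shared helper: the agg-building loop, identical in A and in B (both Pythons build agg with the same loop)
def buildAgg (tiles : List (List String)) : PySem.Dict String (PySem.Set (List String)) :=
  tiles.foldl (fun agg tile =>
    tile.foldl (fun agg border =>
      agg.modify (pkey border) PySem.Set.empty (fun s => PySem.Set.add s tile)) agg) PySem.Dict.empty

def peel (tiles : List (List String)) : List (List String) × (List (String × List (List String))) × List (List String) :=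
  let agg := buildAgg tiles
  -- for border, ts in agg.items(): classify into outer_borders / inner_borders
  -- (the `else: raise ValueError` branch is excluded by Pre_peel; the fold leaves the state unchanged there)
  let bs := agg.items.foldl (fun (p : PySem.Set String × PySem.Set String) kv =>
      if PySem.Set.len kv.2 == 1 then (PySem.Set.add p.1 (pkey kv.1), p.2)
      else if PySem.Set.len kv.2 == 2 then (p.1, PySem.Set.add p.2 (pkey kv.1))
      else p) (PySem.Set.empty, PySem.Set.empty)
  let outer_tiles := PySem.Set.ofList (tiles.filter (fun t => t.any (fun b => PySem.Set.contains bs.1 (pkey b))))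
  let inner_tiles := PySem.Set.ofList (tiles.filter (fun t => t.all (fun b => PySem.Set.contains bs.2 (pkey b))))
  (outer_tiles, agg.items, inner_tiles)

-- ===== PORT B =====
def peel_alt (tiles : List (List String)) : List (List String) × (List (String × List (List String))) × List (List String) :=
  let agg := buildAgg tiles
  -- for ts in agg.values(): if len(ts) == 1: outer_tiles |= ts  (elif len(ts) != 2: raise — excluded by Pre_peel)
  let outer_tiles := agg.values.foldl (fun acc ts =>
      if PySem.Set.len ts == 1 then PySem.Set.union acc ts else acc) PySem.Set.empty
  let inner_tiles := PySem.Set.diff (PySem.Set.ofList tiles) outer_tiles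
  (outer_tiles, agg.items, inner_tiles)

-- ===== PRECONDITION & SPEC =====
-- grp tiles k = the distinct tiles having a border with canonical key k (the set agg[k] denotes)
def grp (tiles : List (List String)) (k : String) : PySem.Set (List String) :=
  PySem.Set.ofList (tiles.filter (fun t => t.any (fun b => pkey b == k)))

-- Pre_peel excludes exactly the inputs where some border key is shared by ≥ 3 distinct tiles,
-- on which the Python A raises ValueError.
def Pre_peel (tiles : List (List String)) : Prop :=
  ∀ t ∈ tiles, ∀ b ∈ t, (grp tiles (pkey b)).length ≤ 2
instance (tiles : List (List String)) : Decidable (Pre_peel tiles) := by unfold Pre_peel; infer_instance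

def pvWitness_peel : List (List String) := [["ab", "cd"], ["dc", "xy"]]

def Spec_peel (tiles : List (List String)) (out : List (List String) × (List (String × List (List String))) × List (List String)) : Prop := out = peel_alt tiles
instance (tiles : List (List String)) (out : List (List String) × (List (String × List (List String))) × List (List String)) : Decidable (Spec_peel tiles out) := by unfold Spec_peel; infer_instance

-- ===== CLAIM (what is proved, stated in full; the proofs are below) =====
def Claim_equal_peel : Prop := ∀ (tiles : List (List String)), Dom_peel tiles → Pre_peel tiles → Spec_peel tiles (peel tiles)

-- ===== LEMMAS AND PROOFS =====

-- ---- generic lemmas about the order of PySem.Set folds ----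
theorem mem_foldl_add_mono {α : Type} [BEq α] [LawfulBEq α] (m : List α) (acc : PySem.Set α) (x : α)
    (h : x ∈ acc) : x ∈ List.foldl PySem.Set.add acc m := by
  induction m generalizing acc with
  | nil => exact h
  | cons y m ih => exact ih _ ((PySem.Set.mem_add _ _ _).mpr (Or.inl h))

theorem mem_foldl_add_self {α : Type} [BEq α] [LawfulBEq α] (m : List α) (acc : PySem.Set α) (x : α)
    (h : x ∈ m) : x ∈ List.foldl PySem.Set.add acc m := by
  induction m generalizing acc with
  | nil => cases h
  | cons y m ih =>
    simp only [List.foldl_cons]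
    rcases List.mem_cons.mp h with rfl | h
    · exact mem_foldl_add_mono m _ x ((PySem.Set.mem_add _ _ _).mpr (Or.inr rfl))
    · exact ih _ h

theorem foldl_add_of_subset {α : Type} [BEq α] [LawfulBEq α] (m : List α) (acc : PySem.Set α)
    (h : ∀ e ∈ m, e ∈ acc) : List.foldl PySem.Set.add acc m = acc := by
  induction m with
  | nil => rfl
  | cons y m ih =>
    have hy : PySem.Set.add acc y = acc := PySem.Set.add_of_mem (h y (by simp))
    simp only [List.foldl_cons, hy]
    exact ih (fun e he => h e (by simp [he]))

theorem foldl_add_const {α : Type} [BEq α] [LawfulBEq α] (m : List α) (acc : PySem.Set α) (t : α)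
    (h1 : ∀ x ∈ m, x = t) (h2 : m ≠ []) :
    List.foldl PySem.Set.add acc m = PySem.Set.add acc t := by
  cases m with
  | nil => exact absurd rfl h2
  | cons y m =>
    have hy : y = t := h1 y (by simp)
    subst hy
    simp only [List.foldl_cons]
    exact foldl_add_of_subset _ _ (fun e he => by
      rw [h1 e (by simp [he])]
      exact (PySem.Set.mem_add _ _ _).mpr (Or.inr rfl))

theorem filter_add {α : Type} [BEq α] [LawfulBEq α] (s : PySem.Set α) (x : α) (p : α → Bool) :
    (PySem.Set.add s x).filter p = if p x then PySem.Set.add (s.filter p) x else s.filter p := by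
  by_cases hx : x ∈ s
  · rw [PySem.Set.add_of_mem hx]
    by_cases hp : p x
    · rw [if_pos hp, PySem.Set.add_of_mem (List.mem_filter.mpr ⟨hx, hp⟩)]
    · rw [if_neg hp]
  · rw [PySem.Set.add_of_not_mem hx, List.filter_append]
    by_cases hp : p x
    · rw [if_pos hp, PySem.Set.add_of_not_mem (fun hc => hx (List.mem_of_mem_filter hc))]
      simp [hp]
    · simp [hp]

theorem foldl_add_filter {α : Type} [BEq α] [LawfulBEq α] (l : List α) (s : PySem.Set α) (p : α → Bool) :
    (List.foldl PySem.Set.add s l).filter p = List.foldl PySem.Set.add (s.filter p) (l.filter p) := by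
  induction l generalizing s with
  | nil => rfl
  | cons x l ih =>
    simp only [List.foldl_cons, List.filter_cons]
    rw [ih, filter_add]
    by_cases hp : p x
    · simp [hp]
    · simp [hp]

theorem ofList_filter {α : Type} [BEq α] [LawfulBEq α] (l : List α) (p : α → Bool) :
    PySem.Set.ofList (l.filter p) = (PySem.Set.ofList l).filter p := by
  rw [PySem.Set.ofList_eq_foldl, PySem.Set.ofList_eq_foldl, foldl_add_filter]
  rfl

-- a prefix stays: a fold of adds only appends
theorem foldl_add_prefix {α : Type} [BEq α] [LawfulBEq α] (l : List α) (s : PySem.Set α) :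
    ∃ m, List.foldl PySem.Set.add s l = s ++ m := by
  induction l generalizing s with
  | nil => exact ⟨[], by simp⟩
  | cons x l ih =>
    simp only [List.foldl_cons]
    by_cases hx : x ∈ s
    · rw [PySem.Set.add_of_mem hx]; exact ih s
    · rw [PySem.Set.add_of_not_mem hx]
      obtain ⟨m, hm⟩ := ih (s ++ [x])
      exact ⟨x :: m, by simp [hm]⟩

theorem foldl_add_nodup {α : Type} [BEq α] [LawfulBEq α] (l : List α) (s : PySem.Set α)
    (hs : s.Nodup) : (List.foldl PySem.Set.add s l).Nodup := by
  induction l generalizing s with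
  | nil => exact hs
  | cons x l ih => exact ih _ (PySem.Set.nodup_add _ _ hs)

-- peeling the first element off a set-of-a-cons
theorem foldl_add_singleton {α : Type} [BEq α] [LawfulBEq α] (l : List α) (x : α) :
    List.foldl PySem.Set.add [x] l = x :: PySem.Set.ofList (l.filter (fun y => !(y == x))) := by
  obtain ⟨m, hm⟩ := foldl_add_prefix l [x]
  have hnd : (List.foldl PySem.Set.add [x] l).Nodup := foldl_add_nodup l [x] (by simp)
  have hxm : x ∉ m := by
    rw [hm] at hnd
    simpa using (List.nodup_cons.mp (by simpa using hnd)).1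
  have hfil : (List.foldl PySem.Set.add [x] l).filter (fun y => !(y == x)) = m := by
    rw [hm, List.singleton_append, List.filter_cons_of_neg (by simp)]
    exact List.filter_eq_self.mpr (fun a ha => by
      have : a ≠ x := fun hax => hxm (hax ▸ ha)
      simpa using this)
  have : PySem.Set.ofList (l.filter (fun y => !(y == x))) = m := by
    rw [PySem.Set.ofList_eq_foldl, ← hfil, foldl_add_filter]
    simp
  rw [this, hm]
  simp
theorem ofList_cons {α : Type} [BEq α] [LawfulBEq α] (l : List α) (x : α) :
    PySem.Set.ofList (x :: l) = x :: PySem.Set.ofList (l.filter (fun y => !(y == x))) := by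
  rw [PySem.Set.ofList_eq_foldl, List.foldl_cons]
  exact foldl_add_singleton l x

-- a flatMap-accumulating fold skips occurrences of x once f x is already in the accumulator
theorem foldl_flat_skip {α β : Type} [BEq α] [LawfulBEq α] [BEq β] [LawfulBEq β]
    (f : α → List β) (l : List α) (acc : PySem.Set β) (x : α) (h : ∀ e ∈ f x, e ∈ acc) :
    List.foldl (fun a y => List.foldl PySem.Set.add a (f y)) acc l
      = List.foldl (fun a y => List.foldl PySem.Set.add a (f y)) acc (l.filter (fun y => !(y == x))) := by
  induction l generalizing acc with
  | nil => rfl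
  | cons y l ih =>
    by_cases hy : y = x
    · subst hy
      rw [List.filter_cons_of_neg (by simp), List.foldl_cons, foldl_add_of_subset _ _ h]
      exact ih acc h
    · rw [List.filter_cons_of_pos (by simpa using hy), List.foldl_cons, List.foldl_cons]
      exact ih _ (fun e he => mem_foldl_add_mono _ _ _ (h e he))

theorem foldl_flat_ofList {α β : Type} [BEq α] [LawfulBEq α] [BEq β] [LawfulBEq β]
    (f : α → List β) (l : List α) (acc : PySem.Set β) :
    List.foldl (fun a y => List.foldl PySem.Set.add a (f y)) acc (PySem.Set.ofList l)
      = List.foldl (fun a y => List.foldl PySem.Set.add a (f y)) acc l := by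
  induction l generalizing acc with
  | nil => rfl
  | cons x l ih =>
    rw [ofList_cons, List.foldl_cons, List.foldl_cons, ofList_filter]
    rw [← foldl_flat_skip f (PySem.Set.ofList l) _ x
      (fun e he => mem_foldl_add_self _ _ _ he)]
    exact ih _

theorem foldl_flat_eq_filter {α : Type} [BEq α] [LawfulBEq α]
    (g : α → List α) (p : α → Bool) (l : List α)
    (h1 : ∀ t ∈ l, ∀ x ∈ g t, x = t) (h2 : ∀ t ∈ l, (g t ≠ []) ↔ p t = true) :
    ∀ acc : PySem.Set α, List.foldl (fun a t => List.foldl PySem.Set.add a (g t)) acc l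
      = List.foldl PySem.Set.add acc (l.filter p) := by
  induction l with
  | nil => intro acc; rfl
  | cons t l ih =>
    intro acc
    simp only [List.foldl_cons, List.filter_cons]
    by_cases hp : p t
    · have hne : g t ≠ [] := (h2 t (by simp)).mpr hp
      rw [foldl_add_const _ _ t (h1 t (by simp)) hne, if_pos hp, List.foldl_cons]
      exact ih (fun u hu => h1 u (by simp [hu])) (fun u hu => h2 u (by simp [hu])) _
    · have hnil : g t = [] := by
        by_contra hc
        exact hp ((h2 t (by simp)).mp hc)
      rw [hnil, if_neg hp]
      simp only [List.foldl_nil]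
      exact ih (fun u hu => h1 u (by simp [hu])) (fun u hu => h2 u (by simp [hu])) _

theorem ofList_flatMap_eq_filter {α : Type} [BEq α] [LawfulBEq α]
    (g : α → List α) (p : α → Bool) (l : List α)
    (h1 : ∀ t ∈ l, ∀ x ∈ g t, x = t) (h2 : ∀ t ∈ l, (g t ≠ []) ↔ p t = true) :
    PySem.Set.ofList (l.flatMap g) = PySem.Set.ofList (l.filter p) := by
  rw [PySem.Set.ofList_eq_foldl, List.foldl_flatMap, PySem.Set.ofList_eq_foldl]
  exact foldl_flat_eq_filter g p l h1 h2 []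

-- ---- pkey ----
theorem pyRev_eq (s : String) : pyRev s = String.ofList s.toList.reverse := by
  unfold pyRev
  simp [PySem.Str.slice?, PySem.Chars.slice?_eq_listSlice?, PySem.List.slice?_none_none_neg_one]

theorem pyRev_pyRev (s : String) : pyRev (pyRev s) = s := by
  rw [pyRev_eq, pyRev_eq]
  simp

theorem pkey_eq_min (b : String) : pkey b = min b (pyRev b) := by
  unfold pkey
  rcases lt_trichotomy (pyRev b) b with h | h | h
  · rw [if_pos (by simpa [PySem.Chars.strLt, String.lt_iff_toList_lt] using h), min_eq_right h.le]
  · rw [h]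
    simp [PySem.Chars.strLt]
  · have hn : ¬ ((pyRev b).toList < b.toList) := by
      rw [← String.lt_iff_toList_lt]
      exact not_lt.mpr h.le
    rw [if_neg (by simpa [PySem.Chars.strLt] using hn), min_eq_left h.le]

theorem pkey_idem (b : String) : pkey (pkey b) = pkey b := by
  rw [pkey_eq_min b]
  rcases le_total b (pyRev b) with h | h
  · rw [min_eq_left h, pkey_eq_min, min_eq_left h]
  · rw [min_eq_right h, pkey_eq_min, pyRev_pyRev, min_eq_left h]

-- ---- agg characterisation ----
def pairs (tiles : List (List String)) : List (String × List String) :=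
  tiles.flatMap (fun t => t.map (fun b => (pkey b, t)))

def firsts (tiles : List (List String)) : List String := (pairs tiles).map (·.1)

theorem firsts_eq (tiles : List (List String)) :
    firsts tiles = tiles.flatMap (fun t => t.map pkey) := by
  unfold firsts pairs
  rw [List.map_flatMap]
  simp [List.map_map, Function.comp_def]

theorem buildAgg_eq (tiles : List (List String)) :
    buildAgg tiles = (pairs tiles).foldl
      (fun d p => d.modify p.1 PySem.Set.empty (fun s => PySem.Set.add s p.2)) PySem.Dict.empty := by
  unfold buildAgg pairs
  rw [List.foldl_flatMap]
  simp only [List.foldl_map]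

theorem getD_fold (ps : List (String × List String)) (d : PySem.Dict String (PySem.Set (List String))) (k : String) :
    ((ps.foldl (fun d p => d.modify p.1 PySem.Set.empty (fun s => PySem.Set.add s p.2)) d).getD k PySem.Set.empty)
      = List.foldl PySem.Set.add (d.getD k PySem.Set.empty) ((ps.filter (fun p => p.1 == k)).map (·.2)) := by
  induction ps generalizing d with
  | nil => rfl
  | cons p ps ih =>
    simp only [List.foldl_cons]
    by_cases hk : p.1 = k
    · subst hk
      rw [ih, PySem.Dict.getD_modify_self, List.filter_cons_of_pos (by simp), List.map_cons,
        List.foldl_cons]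
    · rw [ih, PySem.Dict.getD_modify_of_ne _ _ _ (fun hc => hk hc.symm),
        List.filter_cons_of_neg (by simpa using hk)]

theorem getD_buildAgg (tiles : List (List String)) (k : String) :
    (buildAgg tiles).getD k PySem.Set.empty = grp tiles k := by
  rw [buildAgg_eq, getD_fold]
  have h1 : ((pairs tiles).filter (fun p => p.1 == k)).map (·.2)
      = tiles.flatMap (fun t => (t.filter (fun b => pkey b == k)).map (fun _ => t)) := by
    unfold pairs
    rw [List.filter_flatMap, List.map_flatMap]
    refine List.flatMap_congr (fun t _ => ?_)
    rw [List.filter_map, List.map_map]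
    rfl
  rw [h1]
  show List.foldl PySem.Set.add [] _ = _
  rw [← PySem.Set.ofList_eq_foldl]
  unfold grp
  exact ofList_flatMap_eq_filter _ _ _
    (fun t _ x hx => by
      rcases List.mem_map.mp hx with ⟨b, _, rfl⟩
      rfl)
    (fun t _ => by
      constructor
      · intro hne
        rcases List.exists_mem_of_ne_nil _ hne with ⟨x, hx⟩
        rcases List.mem_map.mp hx with ⟨b, hb, _⟩
        exact List.any_eq_true.mpr ⟨b, List.mem_of_mem_filter hb, (List.mem_filter.mp hb).2⟩
      · intro hany
        rcases List.any_eq_true.mp hany with ⟨b, hb, hbk⟩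
        simp only [ne_eq, List.map_eq_nil_iff, List.filter_eq_nil_iff, not_forall]
        exact ⟨b, hb, by simpa using hbk⟩)

theorem keys_buildAgg (tiles : List (List String)) :
    (buildAgg tiles).keys = PySem.Set.ofList (firsts tiles) := by
  rw [buildAgg_eq]
  rw [PySem.Dict.keys_foldl_modify_key (pairs tiles) (·.1) PySem.Set.empty
    (fun _ p => (fun s => PySem.Set.add s p.2)) PySem.Dict.empty]
  rfl

theorem nodup_keys_buildAgg (tiles : List (List String)) : (buildAgg tiles).keys.Nodup := by
  rw [keys_buildAgg]
  exact PySem.Set.nodup_ofList _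

theorem items_buildAgg (tiles : List (List String)) :
    (buildAgg tiles).items = (PySem.Set.ofList (firsts tiles)).map (fun k => (k, grp tiles k)) := by
  rw [PySem.Dict.items_eq_map_keys _ (nodup_keys_buildAgg tiles) PySem.Set.empty, keys_buildAgg]
  exact List.map_congr_left (fun k _ => by rw [getD_buildAgg])

theorem pkey_fixed_of_mem_firsts (tiles : List (List String)) (k : String)
    (h : k ∈ firsts tiles) : pkey k = k := by
  rw [firsts_eq] at h
  rcases List.mem_flatMap.mp h with ⟨t, _, hk⟩
  rcases List.mem_map.mp hk with ⟨b, _, rfl⟩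
  exact pkey_idem b

theorem pkey_mem_firsts (tiles : List (List String)) (t : List String) (b : String)
    (ht : t ∈ tiles) (hb : b ∈ t) : pkey b ∈ firsts tiles := by
  rw [firsts_eq]
  exact List.mem_flatMap.mpr ⟨t, ht, List.mem_map.mpr ⟨b, hb, rfl⟩⟩

theorem mem_grp_self (tiles : List (List String)) (t : List String) (b : String)
    (ht : t ∈ tiles) (hb : b ∈ t) : t ∈ grp tiles (pkey b) := by
  unfold grp
  rw [PySem.Set.mem_ofList]
  exact List.mem_filter.mpr ⟨ht, List.any_eq_true.mpr ⟨b, hb, by simp⟩⟩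

-- abbreviation for A's border-classification fold
def bsPair (tiles : List (List String)) : PySem.Set String × PySem.Set String :=
  (buildAgg tiles).items.foldl (fun (p : PySem.Set String × PySem.Set String) kv =>
      if PySem.Set.len kv.2 == 1 then (PySem.Set.add p.1 (pkey kv.1), p.2)
      else if PySem.Set.len kv.2 == 2 then (p.1, PySem.Set.add p.2 (pkey kv.1))
      else p) (PySem.Set.empty, PySem.Set.empty)

set_option maxHeartbeats 1600000 in
theorem bsPair_eq (tiles : List (List String)) :
    bsPair tiles = ((PySem.Set.ofList (firsts tiles)).filter (fun k => PySem.Set.len (grp tiles k) == 1),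
                    (PySem.Set.ofList (firsts tiles)).filter (fun k => PySem.Set.len (grp tiles k) == 2)) := by
  unfold bsPair
  have hstep : (fun (p : PySem.Set String × PySem.Set String) (kv : String × PySem.Set (List String)) =>
      if PySem.Set.len kv.2 == 1 then (PySem.Set.add p.1 (pkey kv.1), p.2)
      else if PySem.Set.len kv.2 == 2 then (p.1, PySem.Set.add p.2 (pkey kv.1))
      else p)
      = (fun (p : PySem.Set String × PySem.Set String) kv =>
          ((fun (a : PySem.Set String) (kv : String × PySem.Set (List String)) =>
              if PySem.Set.len kv.2 == 1 then PySem.Set.add a (pkey kv.1) else a) p.1 kv,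
           (fun (a : PySem.Set String) (kv : String × PySem.Set (List String)) =>
              if PySem.Set.len kv.2 == 2 then PySem.Set.add a (pkey kv.1) else a) p.2 kv)) := by
    funext p kv
    by_cases h1 : PySem.Set.len kv.2 == 1
    · have h2 : (PySem.Set.len kv.2 == 2) = false := by
        rw [beq_eq_false_iff_ne]
        rw [beq_iff_eq] at h1
        omega
      simp only [h1, h2, if_true, Bool.false_eq_true, if_false]
    · have h1' : (PySem.Set.len kv.2 == 1) = false := by simpa using h1
      by_cases h2 : PySem.Set.len kv.2 == 2
      · simp only [h1', h2, if_true, Bool.false_eq_true, if_false]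
      · have h2' : (PySem.Set.len kv.2 == 2) = false := by simpa using h2
        simp only [h1', h2', Bool.false_eq_true, if_false]
  rw [hstep, PySem.List.foldl_prod_mk
    (f := fun (a : PySem.Set String) (kv : String × PySem.Set (List String)) =>
      if PySem.Set.len kv.2 == 1 then PySem.Set.add a (pkey kv.1) else a)
    (g := fun (a : PySem.Set String) (kv : String × PySem.Set (List String)) =>
      if PySem.Set.len kv.2 == 2 then PySem.Set.add a (pkey kv.1) else a)]
  have comp : ∀ (c : Int), (buildAgg tiles).items.foldl
      (fun a kv => if PySem.Set.len kv.2 == c then PySem.Set.add a (pkey kv.1) else a) PySem.Set.empty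
      = (PySem.Set.ofList (firsts tiles)).filter (fun k => PySem.Set.len (grp tiles k) == c) := by
    intro c
    rw [PySem.List.foldl_if_eq_foldl_filter
      (fun (kv : String × PySem.Set (List String)) => PySem.Set.len kv.2 == c)
      (fun (a : PySem.Set String) (kv : String × PySem.Set (List String)) => PySem.Set.add a (pkey kv.1))]
    rw [← List.foldl_map (f := fun (kv : String × PySem.Set (List String)) => pkey kv.1)
      (g := PySem.Set.add)]
    rw [items_buildAgg, List.filter_map, List.map_map]
    have hmap : ((PySem.Set.ofList (firsts tiles)).filter
        ((fun (kv : String × PySem.Set (List String)) => PySem.Set.len kv.2 == c) ∘ (fun k => (k, grp tiles k)))).map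
          ((fun (kv : String × PySem.Set (List String)) => pkey kv.1) ∘ (fun k => (k, grp tiles k)))
        = (PySem.Set.ofList (firsts tiles)).filter (fun k => PySem.Set.len (grp tiles k) == c) := by
      have hf : ((fun (kv : String × PySem.Set (List String)) => PySem.Set.len kv.2 == c)
          ∘ (fun (k : String) => (k, grp tiles k))) = (fun k => PySem.Set.len (grp tiles k) == c) := rfl
      rw [hf]
      exact (List.map_congr_left (fun k hk => pkey_fixed_of_mem_firsts tiles k
        ((PySem.Set.mem_ofList _ _).mp (List.mem_of_mem_filter hk)))).trans (List.map_id _)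
    rw [hmap]
    exact (PySem.Set.ofList_eq_foldl _).symm.trans (PySem.Set.ofList_eq_self_of_nodup _
      ((PySem.Set.nodup_ofList (firsts tiles)).filter _))
  rw [comp 1, comp 2]

-- contains on the classification sets, for a border of a tile of the input
theorem contains_bs (tiles : List (List String)) (t : List String) (b : String) (c : Int)
    (ht : t ∈ tiles) (hb : b ∈ t) :
    PySem.Set.contains ((PySem.Set.ofList (firsts tiles)).filter
        (fun k => PySem.Set.len (grp tiles k) == c)) (pkey b)
      = (PySem.Set.len (grp tiles (pkey b)) == c) := by
  rw [Bool.eq_iff_iff, PySem.Set.contains_iff, List.mem_filter]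
  constructor
  · exact fun h => h.2
  · intro h
    exact ⟨(PySem.Set.mem_ofList _ _).mpr (pkey_mem_firsts tiles t b ht hb), h⟩

-- the two outer computations agree (no precondition needed)
theorem outer_eq (tiles : List (List String)) :
    PySem.Set.ofList (tiles.filter (fun t => t.any (fun b => PySem.Set.contains (bsPair tiles).1 (pkey b))))
      = (buildAgg tiles).values.foldl (fun acc ts =>
          if PySem.Set.len ts == 1 then PySem.Set.union acc ts else acc) PySem.Set.empty := by
  -- B's side: a union of the size-1 groups, reorganised as a flatMap fold
  have hvals : (buildAgg tiles).values = ((PySem.Set.ofList (firsts tiles)).map (fun k => (k, grp tiles k))).map (·.2) := by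
    show (buildAgg tiles).items.map (·.2) = _
    rw [items_buildAgg]
  have hB : (buildAgg tiles).values.foldl (fun acc ts =>
        if PySem.Set.len ts == 1 then PySem.Set.union acc ts else acc) PySem.Set.empty
      = PySem.Set.ofList ((firsts tiles).flatMap
          (fun k => if PySem.Set.len (grp tiles k) == 1 then grp tiles k else [])) := by
    rw [hvals, List.foldl_map, List.foldl_map]
    have hstep : (fun (x : PySem.Set (List String)) (y : String) =>
          (fun (acc : PySem.Set (List String)) (ts : PySem.Set (List String)) =>
            if PySem.Set.len ts == 1 then PySem.Set.union acc ts else acc) x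
            ((fun (k : String) => (k, grp tiles k)) y).2)
        = (fun acc k => List.foldl PySem.Set.add acc
            (if PySem.Set.len (grp tiles k) == 1 then grp tiles k else [])) := by
      funext acc k
      show (if PySem.Set.len (grp tiles k) == 1 then PySem.Set.union acc (grp tiles k) else acc) = _
      by_cases h : PySem.Set.len (grp tiles k) == 1
      · rw [if_pos h, if_pos h, PySem.Set.union_eq_update]
        rfl
      · rw [if_neg h, if_neg h]
        rfl
    rw [hstep]
    rw [show (PySem.Set.empty : PySem.Set (List String)) = [] from rfl] at *
    rw [foldl_flat_ofList (fun k => if PySem.Set.len (grp tiles k) == 1 then grp tiles k else [])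
      (firsts tiles) []]
    rw [PySem.Set.ofList_eq_foldl, List.foldl_flatMap]
  rw [hB, firsts_eq, List.flatMap_assoc]
  have hinner : ∀ t : List String, (t.map pkey).flatMap
        (fun k => if PySem.Set.len (grp tiles k) == 1 then grp tiles k else [])
      = t.flatMap (fun b => if PySem.Set.len (grp tiles (pkey b)) == 1 then grp tiles (pkey b) else []) := by
    intro t
    rw [List.flatMap_map]
  simp only [hinner]
  rw [ofList_flatMap_eq_filter
      (fun t => t.flatMap (fun b => if PySem.Set.len (grp tiles (pkey b)) == 1 then grp tiles (pkey b) else []))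
      (fun t => t.any (fun b => PySem.Set.len (grp tiles (pkey b)) == 1)) tiles
      (fun t ht x hx => by
        rcases List.mem_flatMap.mp hx with ⟨b, hb, hxb⟩
        by_cases h1 : PySem.Set.len (grp tiles (pkey b)) == 1
        · rw [if_pos h1] at hxb
          have hlen : (grp tiles (pkey b)).length = 1 := by
            have := (beq_iff_eq).mp h1
            have hlen' : (PySem.Set.len (grp tiles (pkey b))) = ((grp tiles (pkey b)).length : Int) := rfl
            omega
          rcases List.length_eq_one_iff.mp hlen with ⟨a, ha⟩
          have hxa : x = a := by rw [ha] at hxb; simpa using hxb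
          have hta : t = a := by
            have := mem_grp_self tiles t b ht hb
            rw [ha] at this; simpa using this
          rw [hxa, hta]
        · rw [if_neg h1] at hxb; cases hxb)
      (fun t ht => by
        constructor
        · intro hne
          rcases List.exists_mem_of_ne_nil _ hne with ⟨x, hx⟩
          rcases List.mem_flatMap.mp hx with ⟨b, hb, hxb⟩
          by_cases h1 : PySem.Set.len (grp tiles (pkey b)) == 1
          · exact List.any_eq_true.mpr ⟨b, hb, h1⟩
          · rw [if_neg h1] at hxb; cases hxb
        · intro hany
          rcases List.any_eq_true.mp hany with ⟨b, hb, h1⟩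
          intro hnil
          rw [List.flatMap_eq_nil_iff] at hnil
          have := hnil b hb
          rw [if_pos h1] at this
          have hmem := mem_grp_self tiles t b ht hb
          rw [this] at hmem
          cases hmem)]
  -- A's side: rewrite contains through bsPair_eq
  congr 1
  refine List.filter_congr (fun t ht => ?_)
  refine PySem.List.any_congr_mem (fun b hb => ?_)
  rw [bsPair_eq]
  exact contains_bs tiles t b 1 ht hb

-- all-of-not is not-any
theorem all_not_eq_not_any {α : Type} (l : List α) (p : α → Bool) :
    l.all (fun x => !(p x)) = !(l.any p) := by
  induction l with
  | nil => rfl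
  | cons x l ih => simp [ih]

theorem all_congr_mem {α : Type} (l : List α) (f g : α → Bool) (h : ∀ x ∈ l, f x = g x) :
    l.all f = l.all g := by
  induction l with
  | nil => rfl
  | cons x l ih =>
    simp only [List.all_cons, h x (by simp)]
    rw [ih (fun x hx => h x (by simp [hx]))]

-- the two inner computations agree (this is where Pre_peel is used)
theorem inner_eq (tiles : List (List String)) (hpre : Pre_peel tiles) :
    PySem.Set.ofList (tiles.filter (fun t => t.all (fun b => PySem.Set.contains (bsPair tiles).2 (pkey b))))
      = PySem.Set.diff (PySem.Set.ofList tiles)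
          (PySem.Set.ofList (tiles.filter (fun t => t.any (fun b => PySem.Set.contains (bsPair tiles).1 (pkey b))))) := by
  have hlen : ∀ t ∈ tiles, ∀ b ∈ t, (grp tiles (pkey b)).length = 1 ∨ (grp tiles (pkey b)).length = 2 := by
    intro t ht b hb
    have h2 := hpre t ht b hb
    have h1 : 0 < (grp tiles (pkey b)).length :=
      List.length_pos_of_mem (mem_grp_self tiles t b ht hb)
    omega
  have hA : tiles.filter (fun t => t.all (fun b => PySem.Set.contains (bsPair tiles).2 (pkey b)))
      = tiles.filter (fun t => t.all (fun b => PySem.Set.len (grp tiles (pkey b)) == 2)) := by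
    refine List.filter_congr (fun t ht => ?_)
    refine all_congr_mem _ _ _ (fun b hb => ?_)
    rw [bsPair_eq]
    exact contains_bs tiles t b 2 ht hb
  rw [hA]
  have hdiff : ∀ (s u : PySem.Set (List String)),
      PySem.Set.diff s u = s.filter (fun x => !(PySem.Set.contains u x)) := fun _ _ => rfl
  rw [hdiff, ofList_filter]
  refine List.filter_congr (fun t ht => ?_)
  have httiles : t ∈ tiles := (PySem.Set.mem_ofList _ _).mp ht
  have hcont : PySem.Set.contains
      (PySem.Set.ofList (tiles.filter (fun t => t.any (fun b => PySem.Set.contains (bsPair tiles).1 (pkey b))))) t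
      = t.any (fun b => PySem.Set.len (grp tiles (pkey b)) == 1) := by
    rw [Bool.eq_iff_iff, PySem.Set.contains_iff, PySem.Set.mem_ofList, List.mem_filter]
    have hbs1 : ∀ b ∈ t, PySem.Set.contains (bsPair tiles).1 (pkey b)
        = (PySem.Set.len (grp tiles (pkey b)) == 1) := fun b hb => by
      rw [bsPair_eq]
      exact contains_bs tiles t b 1 httiles hb
    constructor
    · intro hmem
      rw [← PySem.List.any_congr_mem hbs1]
      exact hmem.2
    · intro hany
      refine ⟨httiles, ?_⟩
      rw [PySem.List.any_congr_mem hbs1]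
      exact hany
  rw [hcont, ← all_not_eq_not_any]
  refine all_congr_mem _ _ _ (fun b hb => ?_)
  have hl := hlen t httiles b hb
  rcases hl with h | h
  · simp [h]
  · simp [h]

-- the two ports, written out
theorem peel_explicit (tiles : List (List String)) :
    peel tiles = (PySem.Set.ofList (tiles.filter (fun t => t.any (fun b => PySem.Set.contains (bsPair tiles).1 (pkey b)))),
      (buildAgg tiles).items,
      PySem.Set.ofList (tiles.filter (fun t => t.all (fun b => PySem.Set.contains (bsPair tiles).2 (pkey b))))) := rfl

theorem peel_alt_explicit (tiles : List (List String)) :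
    peel_alt tiles = ((buildAgg tiles).values.foldl (fun acc ts =>
        if PySem.Set.len ts == 1 then PySem.Set.union acc ts else acc) PySem.Set.empty,
      (buildAgg tiles).items,
      PySem.Set.diff (PySem.Set.ofList tiles)
        ((buildAgg tiles).values.foldl (fun acc ts =>
          if PySem.Set.len ts == 1 then PySem.Set.union acc ts else acc) PySem.Set.empty)) := rfl

-- ===== VERDICT (by name: the statement is the Claim_ definition above) =====
theorem peel_spec : Claim_equal_peel := by
  intro tiles _ hpre
  unfold Spec_peel
  rw [peel_explicit, peel_alt_explicit, ← outer_eq tiles]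
  exact Prod.ext (by rfl) (Prod.ext (by rfl) (inner_eq tiles hpre))
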